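-- pv_equiv track=rewrite | github.com/afernandosouza/mestrado | projeto_completo/baseline_reproduction/spacing_experiment.py | apply_spacing
-- ===== SOURCE A (Python) =====
-- def apply_spacing(text, n_spaces):
--     """
--     Aplica n_spaces caracteres de espaço entre CADA DUAS palavras consecutivas no texto.
--     Ex: "palavra1 palavra2 palavra3 palavra4" com n_spaces=5
--     se torna "palavra1 palavra2     palavra3 palavra4"
--     """
--     words = text.split()
--     if not words:
--         return ""
--
--     # Se houver apenas uma palavra, não há onde inserir espaços
--     if len(words) == 1:
--         return words[0]
--
--     # Isso significa que o espaço extra é inserido após a segunda palavra, quarta palavra, sexta palavra, etc.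
--     # Exemplo: "palavra1 palavra2 palavra3 palavra4 palavra5" com n_spaces=5
--     # words[0] words[1] (5 espaços) words[2] words[3] (5 espaços) words[4]
--
--     processed_text_parts = []
--     for i in range(len(words)):
--         processed_text_parts.append(words[i])
--         # Se o índice atual for ímpar (ou seja, é a segunda palavra de um par)
--         # E não for a última palavra do texto
--         if (i % 2 == 1) and (i < len(words) - 1):
--             processed_text_parts.append(" " * n_spaces)
--         # Se o número total de palavras for ímpar e estamos na penúltima palavra (words[len-2]),
--         # não adicionamos espaço extra, pois a última palavra (words[len-1]) não forma um par completo.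
--         # Ex: p1 p2 (extra) p3 p4 (extra) p5. O extra só vai depois de p2 e p4.
--         # Se fosse p1 p2 (extra) p3. O extra só vai depois de p2.
--         # A condição (i % 2 == 1) já cuida disso.
--
--     return " ".join(processed_text_parts)
-- ===== SOURCE B (Python) =====
-- def apply_spacing(text, n_spaces):
--     words = text.split()
--     if not words:
--         return ""
--     groups = [" ".join(words[i:i+2]) for i in range(0, len(words), 2)]
--     if len(groups) == 1:
--         return groups[0]
--     sep = " " + " " * n_spaces + " "
--     return sep.join(groups)
-- ===== Notes on version B (the rewrite author's own statement) =====
-- stated objective: simpler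
-- what changed: Replaces the index-parity loop that interleaves padding blocks into a parts list with pairwise chunking: join each consecutive word pair with a single space and join the pair-groups with one precomputed wide separator.
import Mathlib
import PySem

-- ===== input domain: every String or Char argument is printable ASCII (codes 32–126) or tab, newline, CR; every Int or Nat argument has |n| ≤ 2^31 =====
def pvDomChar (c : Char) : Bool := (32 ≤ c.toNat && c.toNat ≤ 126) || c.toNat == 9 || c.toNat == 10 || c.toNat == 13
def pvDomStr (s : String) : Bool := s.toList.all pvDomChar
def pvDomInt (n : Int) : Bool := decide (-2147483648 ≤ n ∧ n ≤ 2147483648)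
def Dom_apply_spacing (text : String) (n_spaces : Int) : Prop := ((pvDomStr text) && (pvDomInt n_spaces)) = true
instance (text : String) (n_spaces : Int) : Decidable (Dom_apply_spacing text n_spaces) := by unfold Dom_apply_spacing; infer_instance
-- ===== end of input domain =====

-- B replaces A's index-parity loop (interleaving padding blocks into a parts list) by pairwise
-- chunking of the word list joined with one precomputed wide separator — a simpler decomposition.


-- ===== PORT A =====
def apply_spacing (text : String) (n_spaces : Int) : String :=
  let words := PySem.Str.split₀ text
  if words = [] then ""
  else if words.length = 1 then (PySem.List.pyGet? words 0).getD ""  -- words[0]; in range, length = 1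
  else
    let parts := (PySem.List.enumerate words).foldl
      (fun acc iw =>
        let acc2 := acc ++ [iw.2]
        if PySem.Int.mod iw.1 2 == 1 && decide (iw.1 < PySem.List.len words - 1) then
          acc2 ++ [String.ofList (PySem.List.pyRepeat [' '] n_spaces)]  -- " " * n_spaces
        else acc2) []
    PySem.Str.join " " parts

-- ===== PORT B =====
def apply_spacing_alt (text : String) (n_spaces : Int) : String :=
  let words := PySem.Str.split₀ text
  if words = [] then ""
  else
    let groups := (PySem.List.pyRange 0 (PySem.List.len words) 2).map
      (fun i => PySem.Str.join " " (PySem.List.slice words (some i) (some (i + 2))))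
    if groups.length = 1 then (PySem.List.pyGet? groups 0).getD ""  -- groups[0]; in range, length = 1
    else
      let sep := String.ofList ([' '] ++ PySem.List.pyRepeat [' '] n_spaces ++ [' '])  -- " " + " "*n + " "
      PySem.Str.join sep groups

-- ===== PRECONDITION & SPEC =====
def Spec_apply_spacing (text : String) (n_spaces : Int) (out : String) : Prop := out = apply_spacing_alt text n_spaces
instance (text : String) (n_spaces : Int) (out : String) : Decidable (Spec_apply_spacing text n_spaces out) := by unfold Spec_apply_spacing; infer_instance

-- ===== CLAIM (what is proved, stated in full; the proofs are below) =====
def Claim_equal_apply_spacing : Prop := ∀ (text : String) (n_spaces : Int), Dom_apply_spacing text n_spaces → Spec_apply_spacing text n_spaces (apply_spacing text n_spaces)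

-- ===== LEMMAS AND PROOFS =====

-- the padding block " " * n_spaces, as characters
def pvPad (n : Int) : List Char := PySem.List.pyRepeat [' '] n

-- common normal form of both programs on a non-empty word list
def pvPairs (n : Int) : List String → List Char
  | [] => []
  | [w] => w.toList
  | w0 :: w1 :: rest =>
      if rest = [] then w0.toList ++ ' ' :: w1.toList
      else w0.toList ++ ' ' :: w1.toList ++ ' ' :: (pvPad n ++ ' ' :: pvPairs n rest)

lemma pv_join_cons_of_ne_nil (sep p : List Char) (rest : List (List Char)) (h : rest ≠ []) :
    PySem.Chars.join sep (p :: rest) = p ++ sep ++ PySem.Chars.join sep rest := by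
  cases rest with
  | nil => exact absurd rfl h
  | cons q t => exact PySem.Chars.join_cons_cons sep p q t

lemma pv_pyRange_two_nil (a b : Int) (h : b ≤ a) : PySem.List.pyRange a b 2 = [] := by
  rw [PySem.List.pyRange_of_pos a b (by norm_num)]
  simp [not_lt.mpr h]

lemma pv_pyRange_two_cons (a b : Int) (h : a < b) :
    PySem.List.pyRange a b 2 = a :: PySem.List.pyRange (a + 2) b 2 := by
  rw [PySem.List.pyRange_of_pos a b (by norm_num), PySem.List.pyRange_of_pos (a + 2) b (by norm_num)]
  have hlen : (if a < b then ((b - a + 2 - 1) / 2).toNat else 0)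
      = (if a + 2 < b then ((b - (a + 2) + 2 - 1) / 2).toNat else 0) + 1 := by
    split_ifs <;> omega
  rw [hlen, List.range_succ_eq_map, List.map_cons, List.map_map]
  refine congrArg₂ List.cons (by simp) (List.map_congr_left ?_)
  intro x _
  simp [Function.comp]
  ring

-- A's loop body is an 'acc ++ g iw' step
lemma pvA_core (n : Int) : ∀ (ws : List String), ws ≠ [] → ∀ (k L : Int), 0 ≤ k → k % 2 = 0 →
    L = k + ws.length →
    PySem.Chars.join [' ']
      (((PySem.List.enumerate ws k).flatMap
        (fun iw => iw.2 :: (if PySem.Int.mod iw.1 2 == 1 && decide (iw.1 < L - 1)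
                            then [String.ofList (pvPad n)] else []))).map String.toList)
      = pvPairs n ws := by
  intro ws
  induction ws using pvPairs.induct with
  | case1 => intro h; exact absurd rfl h
  | case2 w =>
    intro _ k L h0 hk2 hL
    have hc0 : ¬ (k % 2 = 1 ∧ k < L - 1) := by omega
    simp [PySem.List.enumerate, hc0, pvPairs]
  | case3 w0 w1 =>
    intro _ k L h0 hk2 hL
    simp only [List.length_cons, List.length_nil] at hL
    have hc0 : ¬ (k % 2 = 1 ∧ k < L - 1) := by omega
    have hc1 : ¬ ((k + 1) % 2 = 1 ∧ k + 1 < L - 1) := by omega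
    simp [PySem.List.enumerate, hc0, hc1, pvPairs, PySem.Chars.join_cons_cons,
      PySem.Chars.join_singleton]
  | case4 w0 w1 rest hr IH =>
    intro _ k L h0 hk2 hL
    simp only [List.length_cons] at hL
    have hlen : 0 < rest.length := List.length_pos_of_ne_nil hr
    have hc0 : ¬ (k % 2 = 1 ∧ k < L - 1) := by omega
    have hc1 : ((k + 1) % 2 = 1 ∧ k + 1 < L - 1) := by constructor <;> omega
    have IH' := IH hr (k + 2) L (by omega) (by omega) (by omega)
    obtain ⟨r0, r', rfl⟩ : ∃ r0 r', rest = r0 :: r' := by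
      cases rest with | nil => exact absurd rfl hr | cons a b => exact ⟨a, b, rfl⟩
    simp only [PySem.List.enumerate, List.flatMap_cons, List.map_cons, List.map_append,
      List.cons_append] at IH' ⊢
    have hb2 : (PySem.Int.mod (k + 2) 2 == 1 && decide (k + 2 < L - 1)) = false := by
      simp; omega
    rw [show k + 1 + 1 = k + 2 from by ring]
    simp only [hb2, Bool.false_eq_true, if_false, List.map_nil, List.nil_append] at IH'
    have hc2 : ¬ (k % 2 = 1 ∧ k + 2 < L - 1) := by omega
    simp at IH'
    simp [hc0, hc1, hc2, PySem.Chars.join_cons_cons, pvPairs, IH']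

lemma pvB_core (n : Int) : ∀ (ws pre : List String), ws ≠ [] →
    PySem.Chars.join (' ' :: (pvPad n ++ [' ']))
      (((PySem.List.pyRange pre.length (pre.length + ws.length) 2).map
        (fun i => PySem.Str.join " " (PySem.List.slice (pre ++ ws) (some i) (some (i + 2))))).map
        String.toList)
      = pvPairs n ws := by
  intro ws
  induction ws using pvPairs.induct with
  | case1 => intro pre h; exact absurd rfl h
  | case2 w =>
    intro pre _
    rw [pv_pyRange_two_cons _ _ (by simp only [List.length_cons, List.length_nil]; push_cast; omega),
        pv_pyRange_two_nil _ _ (by simp only [List.length_cons, List.length_nil]; push_cast; omega)]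
    simp only [List.map_cons, List.map_nil]
    rw [show ((pre.length : Int) + 2) = ((pre.length : Int) + ((2 : Nat) : Int)) from by norm_num,
        PySem.List.slice_natCast_add, List.drop_left]
    simp [PySem.Chars.join_singleton, PySem.Str.toList_join, pvPairs]
  | case3 w0 w1 =>
    intro pre _
    rw [pv_pyRange_two_cons _ _ (by simp only [List.length_cons, List.length_nil]; push_cast; omega),
        pv_pyRange_two_nil _ _ (by simp only [List.length_cons, List.length_nil]; push_cast; omega)]
    simp only [List.map_cons, List.map_nil]
    rw [show ((pre.length : Int) + 2) = ((pre.length : Int) + ((2 : Nat) : Int)) from by norm_num,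
        PySem.List.slice_natCast_add, List.drop_left]
    simp [PySem.Chars.join_singleton, PySem.Str.toList_join, pvPairs,
      PySem.Chars.join_cons_cons]
  | case4 w0 w1 rest hr IH =>
    intro pre _
    have hlen : 0 < rest.length := List.length_pos_of_ne_nil hr
    have IH' := IH (pre ++ [w0, w1]) hr
    rw [pv_pyRange_two_cons _ _ (by simp only [List.length_cons]; push_cast; omega)]
    simp only [List.map_cons]
    rw [show ((pre.length : Int) + 2) = ((pre.length : Int) + ((2 : Nat) : Int)) from by norm_num,
        PySem.List.slice_natCast_add, List.drop_left]
    simp only [List.append_assoc, List.cons_append, List.nil_append, List.length_append,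
      List.length_cons, List.length_nil] at IH' ⊢
    push_cast at IH' ⊢
    rw [show ((pre.length : Int) + (rest.length + 1 + 1) : Int) = ↑pre.length + 2 + ↑rest.length from by ring]
    rw [pv_join_cons_of_ne_nil _ _ _
      (by rw [pv_pyRange_two_cons _ _ (by omega)]; simp)]
    rw [IH']
    simp [PySem.Str.toList_join, PySem.Chars.join_cons_cons, PySem.Chars.join_singleton,
      pvPairs, hr]

-- ===== VERDICT (by name: the statement is the Claim_ definition above) =====
lemma pv_alt_eq (text : String) (n : Int) (h0 : PySem.Str.split₀ text ≠ []) :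
    (apply_spacing_alt text n).toList = pvPairs n (PySem.Str.split₀ text) := by
  unfold apply_spacing_alt
  simp only [h0, if_false, PySem.List.len_eq]
  have hB := pvB_core n (PySem.Str.split₀ text) [] h0
  simp only [List.length_nil, Nat.cast_zero, zero_add, List.nil_append] at hB
  by_cases hg : ((PySem.List.pyRange 0 ((PySem.Str.split₀ text).length : Int) 2).map
      (fun i => PySem.Str.join " " (PySem.List.slice (PySem.Str.split₀ text) (some i) (some (i + 2))))).length = 1
  · obtain ⟨g, hG⟩ := List.length_eq_one_iff.mp hg
    rw [hG] at hB
    simp only [List.map_cons, List.map_nil, PySem.Chars.join_singleton] at hB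
    simp only [hG]
    simpa using hB
  · simp only [hg, if_false, PySem.Str.toList_join]
    simpa [pvPad] using hB

theorem apply_spacing_spec : Claim_equal_apply_spacing := by
  intro text n _
  unfold Spec_apply_spacing
  by_cases h0 : PySem.Str.split₀ text = []
  · unfold apply_spacing apply_spacing_alt
    simp [h0]
  · apply String.toList_inj.mp
    rw [pv_alt_eq text n h0]
    unfold apply_spacing
    simp only [h0, if_false]
    by_cases h1 : (PySem.Str.split₀ text).length = 1
    · obtain ⟨w, hw⟩ := List.length_eq_one_iff.mp h1
      rw [hw]
      simp [pvPairs]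
    · simp only [h1, if_false]
      rw [show (fun (acc : List String) (iw : Int × String) =>
            let acc2 := acc ++ [iw.2]
            if PySem.Int.mod iw.1 2 == 1 && decide (iw.1 < PySem.List.len (PySem.Str.split₀ text) - 1) then
              acc2 ++ [String.ofList (PySem.List.pyRepeat [' '] n)]
            else acc2)
          = fun acc iw => acc ++ (iw.2 ::
              (if PySem.Int.mod iw.1 2 == 1 && decide (iw.1 < PySem.List.len (PySem.Str.split₀ text) - 1)
               then [String.ofList (pvPad n)] else [])) from by
        funext acc iw
        simp only [pvPad]
        split_ifs <;> simp]
      rw [PySem.List.foldl_append_eq_flatMap]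
      simp only [List.nil_append, PySem.Str.toList_join, PySem.List.len_eq]
      have := pvA_core n (PySem.Str.split₀ text) h0 0 (PySem.Str.split₀ text).length
        le_rfl rfl (by simp)
      simpa using this
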